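-- pv_equiv track=rewrite | github.com/moonctp24/For-Algorithm-Code | Python/Algorithm/hash/disguise.py | solution
-- ===== SOURCE A (Python) =====
-- def solution(clothes):
--     answer = 1
--
--     clothes_type = {}
--     for i in range(len(clothes)):
--         if clothes[i][1] in clothes_type:
--             clothes_type[clothes[i][1]] += 1
--         else: clothes_type[clothes[i][1]] = 1
--
--     for i in clothes_type.values():
--         answer *= i+1
--
--     return answer-1
-- ===== SOURCE B (Python) =====
-- def solution(clothes):
--     types = sorted(c[1] for c in clothes)
--     answer = 1
--     i = 0
--     n = len(types)
--     while i < n: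
--         j = i + 1
--         while j < n and types[j] == types[i]:
--             j += 1
--         answer *= j - i + 1
--         i = j
--     return answer - 1
-- ===== Notes on version B (the rewrite author's own statement) =====
-- stated objective: alternative
-- what changed: Replaces A's dict-based frequency count with a sort of the type fields followed by a run-length walk that multiplies (run length + 1) per run.
import Mathlib
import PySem

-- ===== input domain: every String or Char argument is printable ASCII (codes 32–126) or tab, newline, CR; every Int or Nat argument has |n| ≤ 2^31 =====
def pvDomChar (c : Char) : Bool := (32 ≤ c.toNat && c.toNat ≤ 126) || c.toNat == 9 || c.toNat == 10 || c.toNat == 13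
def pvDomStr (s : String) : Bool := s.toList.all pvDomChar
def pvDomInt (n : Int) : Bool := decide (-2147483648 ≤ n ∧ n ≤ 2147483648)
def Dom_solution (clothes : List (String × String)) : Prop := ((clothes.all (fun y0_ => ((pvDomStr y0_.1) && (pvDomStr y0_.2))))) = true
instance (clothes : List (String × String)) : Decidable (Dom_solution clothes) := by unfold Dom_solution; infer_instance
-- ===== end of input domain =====

-- B replaces A's hash-table frequency count by a sort-then-run-length walk over the type
-- field (objective: alternative decomposition, same result, no speed claim).

-- ===== PORT A =====
def solution (clothes : List (String × String)) : Int :=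
  let ct := (PySem.List.pyRange 0 (PySem.List.len clothes)).foldl
    (fun (ct : PySem.Dict String Int) i =>
      let key := (PySem.List.pyGetD clothes i ("", "")).2   -- index i is always in range here
      if ct.contains key then ct.insert key (ct.getD key 0 + 1)
      else ct.insert key 1) PySem.Dict.empty
  (ct.values.foldl (fun answer v => answer * (v + 1)) 1) - 1

-- ===== PORT B =====
-- the outer while loop of Source B: one step consumes the run of types[i..j-1] and multiplies by j-i+1
def runProd : List String → Int
  | [] => 1
  | x :: xs =>
      (((xs.takeWhile (fun y => y == x)).length : Int) + 2) *
        runProd (xs.dropWhile (fun y => y == x))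
termination_by l => l.length
decreasing_by
  exact Nat.lt_succ_of_le (List.length_dropWhile_le _ _)

def solution_alt (clothes : List (String × String)) : Int :=
  runProd (PySem.List.sorted (clothes.map (fun c => c.2)) (fun x => x)) - 1

-- ===== PRECONDITION & SPEC =====
def Spec_solution (clothes : List (String × String)) (out : Int) : Prop := out = solution_alt clothes
instance (clothes : List (String × String)) (out : Int) : Decidable (Spec_solution clothes out) := by unfold Spec_solution; infer_instance

-- ===== CLAIM (what is proved, stated in full; the proofs are below) =====
def Claim_equal_solution : Prop := ∀ (clothes : List (String × String)), Dom_solution clothes → Spec_solution clothes (solution clothes)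

-- ===== LEMMAS AND PROOFS =====

/-- Both programs compute this product: over the distinct types, (count + 1). -/
def prodT (l : List String) : Int :=
  ((PySem.Set.ofList l).map (fun k => (l.count k : Int) + 1)).prod

lemma foldl_mul_succ (l : List Int) (a : Int) :
    l.foldl (fun acc v => acc * (v + 1)) a = a * (l.map (fun v => v + 1)).prod := by
  induction l generalizing a with
  | nil => simp
  | cons x t ih => simp [List.foldl_cons, ih, mul_assoc]

lemma A_eq (clothes : List (String × String)) :
    solution clothes = prodT (clothes.map (fun c => c.2)) - 1 := by
  show (List.foldl
      (fun (ct : PySem.Dict String Int) i =>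
        if ct.contains (PySem.List.pyGetD clothes i ("", "")).2 = true then
          ct.insert (PySem.List.pyGetD clothes i ("", "")).2
            (ct.getD (PySem.List.pyGetD clothes i ("", "")).2 0 + 1)
        else ct.insert (PySem.List.pyGetD clothes i ("", "")).2 1)
      PySem.Dict.empty (PySem.List.pyRange 0 (PySem.List.len clothes))).values.foldl
      (fun answer v => answer * (v + 1)) 1 - 1 = _
  have h1 : List.foldl
      (fun (ct : PySem.Dict String Int) i =>
        if ct.contains (PySem.List.pyGetD clothes i ("", "")).2 = true then
          ct.insert (PySem.List.pyGetD clothes i ("", "")).2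
            (ct.getD (PySem.List.pyGetD clothes i ("", "")).2 0 + 1)
        else ct.insert (PySem.List.pyGetD clothes i ("", "")).2 1)
      PySem.Dict.empty (PySem.List.pyRange 0 (PySem.List.len clothes))
    = List.foldl (fun (ct : PySem.Dict String Int) c =>
        if ct.contains c.2 = true then ct.insert c.2 (ct.getD c.2 0 + 1)
        else ct.insert c.2 1) PySem.Dict.empty clothes := by
    simpa using PySem.List.foldl_pyRange_pyGetD clothes ("", "")
      (fun (ct : PySem.Dict String Int) c =>
        if ct.contains c.2 = true then ct.insert c.2 (ct.getD c.2 0 + 1)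
        else ct.insert c.2 1) PySem.Dict.empty (a := 0) le_rfl
  rw [h1]
  rw [show (clothes.foldl
      (fun (ct : PySem.Dict String Int) c =>
        if ct.contains c.2 = true then ct.insert c.2 (ct.getD c.2 0 + 1)
        else ct.insert c.2 1) PySem.Dict.empty)
    = ((clothes.map (fun c => c.2)).foldl
      (fun (ct : PySem.Dict String Int) k =>
        if ct.contains k = true then ct.insert k (ct.getD k 0 + 1) else ct.insert k 1)
      PySem.Dict.empty) from by rw [List.foldl_map]]
  rw [PySem.List.foldl_congr_mem _ _
      (fun (ct : PySem.Dict String Int) k => ct.insert k (ct.getD k 0 + 1)) _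
      (by
        intro ct k _
        by_cases h : ct.contains k = true
        · simp [h]
        · simp only [Bool.not_eq_true] at h
          simp [h, PySem.Dict.getD_of_not_contains ct 0 h])]
  rw [PySem.Dict.foldl_insert_getD_add_one_eq_counter]
  rw [PySem.Dict.values_eq_map_keys _ (PySem.Dict.nodup_keys_counter _) 0]
  rw [foldl_mul_succ]
  simp [PySem.Dict.keys_counter, PySem.Dict.getD_counter, prodT, List.map_map,
    Function.comp_def]

lemma foldl_add_cons {s : List String} {l : List String} {x : String}
    (hx : x ∉ l) : l.foldl PySem.Set.add (x :: s) = x :: l.foldl PySem.Set.add s := by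
  induction l generalizing s with
  | nil => rfl
  | cons y t ih =>
    have hyx : (y == x) = false := by
      simp only [beq_eq_false_iff_ne, ne_eq]
      intro h; exact hx (h ▸ List.mem_cons_self)
    have hxt : x ∉ t := fun h => hx (List.mem_cons_of_mem _ h)
    simp only [List.foldl_cons]
    have hyx' : y ≠ x := by simpa using hyx
    have hstep : PySem.Set.add (x :: s) y = x :: PySem.Set.add s y := by
      simp only [PySem.Set.add]
      by_cases h : y ∈ s
      · simp [h]
      · simp [h, hyx']
    rw [hstep, ih hxt]

lemma foldl_add_of_mem {l : List String} {s : List String}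
    (h : ∀ y ∈ l, y ∈ s) : l.foldl PySem.Set.add s = s := by
  induction l with
  | nil => rfl
  | cons y t ih =>
    have hy : PySem.Set.add s y = s := by
      simp [PySem.Set.add, h y List.mem_cons_self]
    simp only [List.foldl_cons, hy]
    exact ih (fun z hz => h z (List.mem_cons_of_mem _ hz))

/-- On a ≤-sorted list, the run-length product of Source B is the distinct-type product. -/
lemma runProd_eq_prodT (l : List String) (hs : l.Pairwise (· ≤ ·)) :
    runProd l = prodT l := by
  induction l using runProd.induct with
  | case1 => simp [runProd, prodT, PySem.Set.ofList]
  | case2 x xs ih =>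
    have hpair := hs
    rw [List.pairwise_cons] at hpair
    obtain ⟨hxle, hxs⟩ := hpair
    set tw := xs.takeWhile (fun y => y == x) with htw
    set dw := xs.dropWhile (fun y => y == x) with hdw
    have hsplit : tw ++ dw = xs := List.takeWhile_append_dropWhile
    have htweq : ∀ y ∈ tw, y = x := by
      intro y hy
      have := List.mem_takeWhile_imp hy
      simpa using this
    have hxdw : x ∉ dw := by
      cases hd : dw with
      | nil => simp
      | cons d0 dtl =>
        have hd0ne : d0 ≠ x := by
          have := List.head_dropWhile_not (fun y => y == x) (l := xs)
          rw [← hdw, hd] at this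
          simpa using this (by simp)
        have hd0mem : d0 ∈ xs := by
          rw [← hsplit, hd]; simp
        have hxd0 : x ≤ d0 := hxle d0 hd0mem
        have hdwsorted : (d0 :: dtl).Pairwise (· ≤ ·) := by
          rw [← hd]
          exact hxs.sublist (List.dropWhile_sublist _)
        rw [List.pairwise_cons] at hdwsorted
        intro hmem
        rcases List.mem_cons.mp hmem with h | h
        · exact hd0ne h.symm
        · have : d0 ≤ x := hdwsorted.1 x h
          exact hd0ne (le_antisymm this hxd0)
    have hdwsorted : dw.Pairwise (· ≤ ·) :=
      hxs.sublist (List.dropWhile_sublist _)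
    have hcx : (x :: xs).count x = tw.length + 1 := by
      rw [List.count_cons_self, ← hsplit, List.count_append]
      have h1 : tw.count x = tw.length :=
        List.count_eq_length.mpr (fun y hy => ((htweq y hy).symm : x = y))
      have h2 : dw.count x = 0 := List.count_eq_zero.mpr hxdw
      omega
    have hck : ∀ k, k ≠ x → (x :: xs).count k = dw.count k := by
      intro k hk
      have h1 : (x :: xs).count k = xs.count k := by
        simp [Ne.symm hk]
      rw [h1, ← hsplit, List.count_append]
      have : tw.count k = 0 := List.count_eq_zero.mpr
        (fun hm => hk (htweq k hm))
      omega
    have hset : PySem.Set.ofList (x :: xs) = x :: PySem.Set.ofList dw := by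
      show (x :: xs).foldl PySem.Set.add [] = _
      rw [List.foldl_cons]
      have : PySem.Set.add ([] : List String) x = [x] := rfl
      rw [this, ← hsplit, List.foldl_append]
      rw [foldl_add_of_mem (s := [x]) (by intro y hy; simp [htweq y hy])]
      exact foldl_add_cons hxdw
    rw [runProd, ← htw, ← hdw, ih hdwsorted]
    unfold prodT
    rw [hset, List.map_cons, List.prod_cons, hcx]
    have hmapeq : (PySem.Set.ofList dw).map (fun k => ((x :: xs).count k : Int) + 1)
        = (PySem.Set.ofList dw).map (fun k => (dw.count k : Int) + 1) := by
      apply List.map_congr_left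
      intro k hk
      have hkdw : k ∈ dw := (PySem.Set.mem_ofList dw k).mp hk
      have hkx : k ≠ x := fun h => hxdw (h ▸ hkdw)
      rw [hck k hkx]
    rw [hmapeq]
    push_cast
    ring

lemma B_eq (clothes : List (String × String)) :
    solution_alt clothes = prodT (clothes.map (fun c => c.2)) - 1 := by
  unfold solution_alt
  set ts := clothes.map (fun c => c.2) with hts
  set ss := PySem.List.sorted ts (fun x => x) with hss
  have hsorted : ss.Pairwise (· ≤ ·) := by
    have := PySem.List.sorted_pairwise ts (fun x => x)
    simpa using this
  rw [runProd_eq_prodT ss hsorted]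
  have hperm : ss.Perm ts := PySem.List.sorted_perm ts (fun x => x) false
  have hsetperm : (PySem.Set.ofList ss).Perm (PySem.Set.ofList ts) := by
    rw [List.perm_ext_iff_of_nodup (PySem.Set.nodup_ofList ss) (PySem.Set.nodup_ofList ts)]
    intro a
    rw [PySem.Set.mem_ofList, PySem.Set.mem_ofList]
    exact hperm.mem_iff
  have hmap : (PySem.Set.ofList ss).map (fun k => (ss.count k : Int) + 1)
      = (PySem.Set.ofList ss).map (fun k => (ts.count k : Int) + 1) := by
    apply List.map_congr_left
    intro k _
    rw [hperm.count_eq]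
  unfold prodT
  rw [hmap, (hsetperm.map (fun k => (ts.count k : Int) + 1)).prod_eq]

-- ===== VERDICT (by name: the statement is the Claim_ definition above) =====
theorem solution_spec : Claim_equal_solution := by
  intro clothes _
  show solution clothes = solution_alt clothes
  rw [A_eq, B_eq]
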